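-- pv_equiv track=rewrite | github.com/csohelper/ethercheck-back | graph.py | optimize_stepped_data
-- ===== SOURCE A (Python) =====
-- def optimize_stepped_data(data: list[dict]) -> list[dict]:
--     """
--     Оптимизация для stepped графиков.
--     Удаляет промежуточные точки в длинных сериях одинаковых значений,
--     но оставляет первую и последнюю точку каждой серии для правильного отображения временных интервалов.
--     """
--     if len(data) <= 2:
--         return data
--
--     optimized = []
--     i = 0
--
--     while i < len(data):
--         current_y = data[i]['y']
--
--         # Добавляем первую точку серии
--         optimized.append(data[i])
--
--         # Ищем где заканчивается серия одинаковых значений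
--         j = i + 1
--         while j < len(data) and data[j]['y'] == current_y:
--             j += 1
--
--         # Если серия длиннее 1 точки, добавляем последнюю точку серии
--         if j - i > 1:
--             optimized.append(data[j - 1])
--
--         # Переходим к следующей серии
--         i = j
--
--     # Всегда добавляем последнюю точку, если её ещё нет
--     if not optimized or optimized[-1]['x'] != data[-1]['x']:
--         optimized.append(data[-1])
--
--     return optimized
-- ===== SOURCE B (Python) =====
-- def optimize_stepped_data(data: list[dict]) -> list[dict]:
--     """Single pass with a run-boundary predicate: keep a point iff its y differs
--     from its predecessor's or its successor's y (ends count as boundaries)."""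
--     if len(data) <= 2:
--         return data
--
--     out = []
--     prev_y = None
--     for point, nxt in zip(data, data[1:] + [None]):
--         y = point['y']
--         next_y = None if nxt is None else nxt['y']
--         if y != prev_y or y != next_y:
--             out.append(point)
--         prev_y = y
--     return out
-- ===== Notes on version B (the rewrite author's own statement) =====
-- stated objective: simpler
-- what changed: Replaces A's run-jumping outer/inner while loops and dead trailing-append check by a single pass over zip(data, data[1:]+[None]) that keeps a point iff its y differs from its predecessor's or successor's y.
-- crash fix: On lists of length >= 3 whose dicts all have a 'y' key but whose last dict lacks 'x', A raises KeyError('x') in its dead trailing check while B returns the optimized list. — e.g. on optimize_stepped_data([[("y", 0)], [("y", 0)], [("y", 1)]]): A raises KeyError, B returns [[("y", 0)], [("y", 0)], [("y", 1)]]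
import Mathlib
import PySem

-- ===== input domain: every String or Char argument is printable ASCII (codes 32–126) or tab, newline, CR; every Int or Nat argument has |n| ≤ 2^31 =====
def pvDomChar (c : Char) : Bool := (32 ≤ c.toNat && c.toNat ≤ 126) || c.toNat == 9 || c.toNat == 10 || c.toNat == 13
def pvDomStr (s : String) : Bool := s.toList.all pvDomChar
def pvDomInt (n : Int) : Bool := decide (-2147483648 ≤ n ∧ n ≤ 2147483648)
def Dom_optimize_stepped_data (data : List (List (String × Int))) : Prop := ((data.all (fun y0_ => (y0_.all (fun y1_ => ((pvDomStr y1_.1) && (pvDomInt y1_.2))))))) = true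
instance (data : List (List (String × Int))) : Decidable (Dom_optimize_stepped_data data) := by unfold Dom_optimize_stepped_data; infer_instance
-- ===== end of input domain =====

-- B replaces A's run-jumping nested while loops by a single pass keeping each point
-- whose y differs from its predecessor's or successor's (objective: simpler).
-- Equivalence is about the return value; neither program mutates its argument.

-- ===== PORT A =====
-- d[k] for a dict: first match in the association list; default 0 is never
-- reached on Pre_ (a missing key is Python's KeyError, excluded by Pre_).
def dGet (d : List (String × Int)) (k : String) : Int :=
  ((d.find? (fun kv => kv.1 == k)).map Prod.snd).getD 0

-- inner while: j starts at i+1 and advances while data[j]['y'] == current_y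
def findRunEnd (data : List (List (String × Int))) (y : Int) (j : Nat) : Nat :=
  if h : j < data.length then
    if dGet (data.getD j []) "y" = y then findRunEnd data y (j + 1) else j
  else j
termination_by data.length - j

theorem le_findRunEnd (data : List (List (String × Int))) (y : Int) (j : Nat) :
    j ≤ findRunEnd data y j := by
  unfold findRunEnd
  split
  · split
    · exact le_trans (Nat.le_succ j) (le_findRunEnd data y (j + 1))
    · exact le_rfl
  · exact le_rfl
termination_by data.length - j

-- outer while over i, accumulating `optimized`
def aMain (data : List (List (String × Int))) (i : Nat) (acc : List (List (String × Int))) :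
    List (List (String × Int)) :=
  if h : i < data.length then
    let current_y := dGet (data.getD i []) "y"
    let acc1 := acc ++ [data.getD i []]
    let j := findRunEnd data current_y (i + 1)
    let acc2 := if j - i > 1 then acc1 ++ [data.getD (j - 1) []] else acc1
    aMain data j acc2
  else acc
termination_by data.length - i
decreasing_by
  have := le_findRunEnd data (dGet (data.getD i []) "y") (i + 1)
  omega

def optimize_stepped_data (data : List (List (String × Int))) : List (List (String × Int)) :=
  if data.length ≤ 2 then data
  else
    let optimized := aMain data 0 []
    -- xs[-1] on a nonempty list is its last element (data is nonempty here,
    -- and optimized is only indexed after the emptiness test)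
    if optimized.isEmpty = true ∨
        dGet (optimized.getLast?.getD []) "x" ≠ dGet (data.getLast?.getD []) "x" then
      optimized ++ [data.getLast?.getD []]
    else optimized

-- ===== PORT B =====
-- the for-loop over zip(data, data[1:] + [None]) with carried prev_y
def bLoop (prevY : Option Int)
    (pairs : List (List (String × Int) × Option (List (String × Int)))) :
    List (List (String × Int)) :=
  match pairs with
  | [] => []
  | (p, nxt) :: rest =>
      let y := dGet p "y"
      let nextY := nxt.map (fun q => dGet q "y")
      (if some y ≠ prevY ∨ some y ≠ nextY then [p] else []) ++ bLoop (some y) rest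

def optimize_stepped_data_alt (data : List (List (String × Int))) : List (List (String × Int)) :=
  if data.length ≤ 2 then data
  else bLoop none (data.zip ((data.drop 1).map some ++ [none]))

-- ===== PRECONDITION & SPEC =====
def hasKey (d : List (String × Int)) (k : String) : Bool :=
  (d.find? (fun kv => kv.1 == k)).isSome

-- Excludes exactly Python A's KeyErrors: for len(data) > 2 every dict is read at 'y',
-- and the final (dead) check reads data[-1]['x'].
def Pre_optimize_stepped_data (data : List (List (String × Int))) : Prop :=
  data.length ≤ 2 ∨
    ((∀ d ∈ data, hasKey d "y" = true) ∧ hasKey (data.getLast?.getD []) "x" = true)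

instance (data : List (List (String × Int))) : Decidable (Pre_optimize_stepped_data data) := by
  unfold Pre_optimize_stepped_data; infer_instance

def pvWitness_optimize_stepped_data : (List (List (String × Int))) :=
  [[("y", 1), ("x", 1)], [("y", 1), ("x", 2)], [("y", 2), ("x", 3)]]

-- A raises KeyError 'x' (its dead trailing check) on inputs of length ≥ 3 whose dicts all
-- have 'y' but whose last dict lacks 'x'; B never reads 'x' and returns the optimized list.
def Raises_optimize_stepped_data (data : List (List (String × Int))) : Prop :=
  3 ≤ data.length ∧ (∀ d ∈ data, hasKey d "y" = true) ∧
    hasKey (data.getLast?.getD []) "x" = false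

instance (data : List (List (String × Int))) : Decidable (Raises_optimize_stepped_data data) := by
  unfold Raises_optimize_stepped_data; infer_instance

def pvRaiseWitness_optimize_stepped_data : (List (List (String × Int))) :=
  [[("y", 0)], [("y", 0)], [("y", 1)]]

def pvRaiseWitnessOut_optimize_stepped_data : List (List (String × Int)) :=
  [[("y", 0)], [("y", 0)], [("y", 1)]]

def Spec_optimize_stepped_data (data : List (List (String × Int))) (out : List (List (String × Int))) : Prop := out = optimize_stepped_data_alt data
instance (data : List (List (String × Int))) (out : List (List (String × Int))) : Decidable (Spec_optimize_stepped_data data out) := by unfold Spec_optimize_stepped_data; infer_instance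

-- ===== CLAIM (what is proved, stated in full; the proofs are below) =====
def Claim_equal_optimize_stepped_data : Prop := ∀ (data : List (List (String × Int))), Dom_optimize_stepped_data data → Pre_optimize_stepped_data data → Spec_optimize_stepped_data data (optimize_stepped_data data)

def Claim_raises_optimize_stepped_data : Prop :=
  (∀ (data : List (List (String × Int))), Dom_optimize_stepped_data data →
      Raises_optimize_stepped_data data → ¬ Pre_optimize_stepped_data data) ∧
    (Dom_optimize_stepped_data (pvRaiseWitness_optimize_stepped_data) ∧
      Raises_optimize_stepped_data (pvRaiseWitness_optimize_stepped_data) ∧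
      optimize_stepped_data_alt (pvRaiseWitness_optimize_stepped_data) =
        pvRaiseWitnessOut_optimize_stepped_data)

-- ===== LEMMAS AND PROOFS =====

-- the common run decomposition: first point of each maximal equal-y run,
-- then its last point when the run has length > 1
def runs : List (List (String × Int)) → List (List (String × Int))
  | [] => []
  | d :: rest =>
      let p := fun e => dGet e "y" == dGet d "y"
      d :: ((if (rest.takeWhile p).isEmpty then []
             else [(rest.takeWhile p).getLast?.getD []]) ++ runs (rest.dropWhile p))
termination_by l => l.length
decreasing_by
  have := List.length_dropWhile_le p rest
  simp; omega

-- what B computes from the middle of a run of value y onward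
def midRuns (y : Int) (l : List (List (String × Int))) : List (List (String × Int)) :=
  let p := fun e => dGet e "y" == y
  (if (l.takeWhile p).isEmpty then [] else [(l.takeWhile p).getLast?.getD []]) ++
    runs (l.dropWhile p)

theorem runs_cons (d : List (String × Int)) (rest : List (List (String × Int))) :
    runs (d :: rest) = d :: midRuns (dGet d "y") rest := by
  rw [runs, midRuns]

theorem drop_length_takeWhile {α : Type} (p : α → Bool) (l : List α) :
    l.drop (l.takeWhile p).length = l.dropWhile p := by
  induction l with
  | nil => simp
  | cons a l ih =>
      by_cases h : p a <;> simp [List.takeWhile_cons, List.dropWhile_cons, h, ih]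

theorem findRunEnd_eq (data : List (List (String × Int))) (y : Int) (j : Nat) :
    findRunEnd data y j =
      j + ((data.drop j).takeWhile (fun e => dGet e "y" == y)).length := by
  unfold findRunEnd
  split
  · rename_i h
    have hget : data.getD j [] = data[j] := List.getD_eq_getElem data [] h
    rw [List.drop_eq_getElem_cons h]
    rw [hget]
    split
    · rename_i hy
      rw [findRunEnd_eq data y (j + 1), List.takeWhile_cons]
      rw [if_pos (by simpa using hy)]
      simp only [List.length_cons]
      omega
    · rename_i hy
      rw [List.takeWhile_cons, if_neg (by simpa using hy)]
      simp
  · rename_i h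
    rw [List.drop_eq_nil_of_le (by omega)]
    simp
termination_by data.length - j

theorem aMain_eq (data : List (List (String × Int))) (i : Nat)
    (acc : List (List (String × Int))) :
    aMain data i acc = acc ++ runs (data.drop i) := by
  unfold aMain
  split
  · rename_i h
    have hdrop := List.drop_eq_getElem_cons h
    have hget : data.getD i [] = data[i] := List.getD_eq_getElem data [] h
    set y := dGet (data.getD i []) "y" with hy
    set t := ((data.drop (i + 1)).takeWhile (fun e => dGet e "y" == y)) with ht
    have hj : findRunEnd data y (i + 1) = i + 1 + t.length := findRunEnd_eq data y (i + 1)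
    have hdropj : data.drop (findRunEnd data y (i + 1)) =
        (data.drop (i + 1)).dropWhile (fun e => dGet e "y" == y) := by
      rw [hj, ← List.drop_drop, ht, drop_length_takeWhile]
    have hlast : t ≠ [] → data.getD (findRunEnd data y (i + 1) - 1) [] = t.getLast?.getD [] := by
      intro htne
      have hpre : t <+: data.drop (i + 1) := List.takeWhile_prefix _
      have htl : t.length ≠ 0 := by simpa [List.length_eq_zero_iff] using htne
      have hlt : t.length - 1 < t.length := by omega
      have hlen : t.length ≤ (data.drop (i + 1)).length := hpre.length_le
      have hlen2 : i + 1 + t.length ≤ data.length := by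
        have := List.length_drop (l := data) (i := i + 1)
        omega
      have hidx : findRunEnd data y (i + 1) - 1 = (i + 1) + (t.length - 1) := by omega
      rw [hidx]
      have hlt2 : (i + 1) + (t.length - 1) < data.length := by omega
      rw [List.getD_eq_getElem data [] hlt2]
      rw [List.getLast?_eq_getElem?, List.getElem?_eq_getElem hlt]
      simp only [Option.getD_some]
      rw [hpre.getElem hlt]
      simp [List.getElem_drop]
    rw [aMain_eq data (findRunEnd data y (i + 1)) _]
    conv_rhs => rw [hdrop]
    rw [runs_cons, midRuns]
    simp only [← hget, ← hy]
    rw [hdropj]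
    by_cases htne : t = []
    · have hc : ¬ (findRunEnd data y (i + 1) - i > 1) := by
        rw [hj, htne]; simp
      have hemp : t.isEmpty = true := by simp [htne]
      simp only [ht] at hemp
      simp [hc, hemp]
    · have hc : findRunEnd data y (i + 1) - i > 1 := by
        have : t.length ≠ 0 := by simpa [List.length_eq_zero_iff] using htne
        omega
      rw [if_pos hc, hlast htne]
      have hemp : t.isEmpty = false := by simpa [List.isEmpty_iff] using htne
      simp only [ht] at hemp
      simp [hemp, ht]
  · rename_i h
    rw [List.drop_eq_nil_of_le (by omega), runs]
    simp
termination_by data.length - i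
decreasing_by
  have := le_findRunEnd data (dGet (data.getD i []) "y") (i + 1)
  omega

-- the zipped pair list B iterates over
def zs (l : List (List (String × Int))) :
    List (List (String × Int) × Option (List (String × Int))) :=
  l.zip ((l.drop 1).map some ++ [none])

theorem zs_cons (d : List (String × Int)) (rest : List (List (String × Int))) :
    zs (d :: rest) = (d, rest.head?) :: zs rest := by
  cases rest <;> simp [zs]

theorem runs_ne_nil (l : List (List (String × Int))) (h : l ≠ []) : runs l ≠ [] := by
  cases l with
  | nil => simp at h
  | cons d rest => rw [runs_cons]; simp

theorem bLoop_eq (rest : List (List (String × Int))) :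
    ∀ (d : List (String × Int)) (prevY : Option Int),
      bLoop prevY (zs (d :: rest)) =
        if prevY = some (dGet d "y") then midRuns (dGet d "y") (d :: rest)
        else runs (d :: rest) := by
  induction rest with
  | nil =>
      intro d prevY
      by_cases hp : prevY = some (dGet d "y") <;>
        simp [zs, bLoop, runs_cons, runs, midRuns, hp, List.takeWhile_cons]
  | cons e rest' ih =>
      intro d prevY
      rw [zs_cons, bLoop]
      simp only [List.head?_cons, Option.map_some]
      rw [ih e (some (dGet d "y"))]
      by_cases hye : dGet e "y" = dGet d "y"
      · have hpe : (fun e' => dGet e' "y" == dGet e "y") =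
            (fun e' => dGet e' "y" == dGet d "y") := by
          funext e'; simp [hye]
        by_cases hp : prevY = some (dGet d "y")
        · -- middle of a run: d is skipped
          rw [if_neg (by simp [hp, hye]), if_pos (by simp [hye]), if_pos hp]
          simp only [List.nil_append, midRuns, hpe, hye]
          have htw : (d :: e :: rest').takeWhile (fun e' => dGet e' "y" == dGet d "y") =
              d :: (e :: rest').takeWhile (fun e' => dGet e' "y" == dGet d "y") := by
            simp [List.takeWhile_cons]
          have htw2 : (e :: rest').takeWhile (fun e' => dGet e' "y" == dGet d "y") =
              e :: rest'.takeWhile (fun e' => dGet e' "y" == dGet d "y") := by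
            simp [List.takeWhile_cons, hye]
          rw [htw, htw2]
          simp [List.dropWhile_cons, hye]
        · -- start of a run: d is emitted
          rw [if_pos (Or.inl (fun hh => hp hh.symm)), if_pos (by simp [hye]), if_neg hp,
            runs_cons]
          simp [midRuns, hpe, hye]
      · -- d ends its run: the next y differs
        rw [if_pos (Or.inr (by simp; exact fun hh => hye hh.symm))]
        rw [if_neg (by simp; exact fun hh => hye hh.symm)]
        have htw : (e :: rest').takeWhile (fun e' => dGet e' "y" == dGet d "y") = [] := by
          simp [List.takeWhile_cons, hye]
        have hdw : (e :: rest').dropWhile (fun e' => dGet e' "y" == dGet d "y") =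
            e :: rest' := by
          simp [List.dropWhile_cons, hye]
        by_cases hp : prevY = some (dGet d "y") <;>
          simp [hp, runs_cons, midRuns, htw, hdw, List.takeWhile_cons, hye]

theorem runs_getLast? (l : List (List (String × Int))) (h : l ≠ []) :
    (runs l).getLast? = l.getLast? := by
  match l with
  | d :: rest =>
    rw [runs_cons, midRuns]
    set p := fun e => dGet e "y" == dGet d "y" with hp
    by_cases hdw : rest.dropWhile p = []
    · have hrest : rest.takeWhile p = rest := by
        conv_rhs => rw [← List.takeWhile_append_dropWhile (p := p) (l := rest), hdw]
        simp
      by_cases htw : rest.takeWhile p = []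
      · have : rest = [] := by rw [← hrest, htw]
        subst this
        simp [runs, htw]
      · have hrne : rest ≠ [] := by rw [← hrest]; exact htw
        have hemp : (rest.takeWhile p).isEmpty = false := by
          simpa [List.isEmpty_iff] using htw
        rcases hg : rest.getLast? with _ | x
        · exact absurd (List.getLast?_eq_none_iff.mp hg) hrne
        · rw [hdw, runs]
          simp [hemp, hrest, List.getLast?_cons, hg, hrne]
    · have hrr := runs_getLast? (rest.dropWhile p) hdw
      have hrn := runs_ne_nil (rest.dropWhile p) hdw
      have hrne : rest ≠ [] := by
        intro hnil; rw [hnil] at hdw; simp at hdw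
      rcases hg : (rest.dropWhile p).getLast? with _ | x
      · exact absurd (List.getLast?_eq_none_iff.mp hg) hdw
      · have hg2 : rest.getLast? = some x := by
          conv_lhs => rw [← List.takeWhile_append_dropWhile (p := p) (l := rest)]
          rw [List.getLast?_append, hg]
          simp
        simp [List.getLast?_cons, List.getLast?_append, hrr, hg, hg2]
  termination_by l.length
  decreasing_by
    have := List.length_dropWhile_le (fun e => dGet e "y" == dGet d "y") rest
    simp only [List.length_cons]
    omega

theorem alt_eq_runs (data : List (List (String × Int))) (h : ¬ data.length ≤ 2) :
    optimize_stepped_data_alt data = runs data := by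
  rw [optimize_stepped_data_alt, if_neg h]
  match data, h with
  | d :: rest, _ =>
      have hzs : (d :: rest).zip (((d :: rest).drop 1).map some ++ [none]) = zs (d :: rest) := rfl
      rw [hzs, bLoop_eq rest d none, if_neg (by simp)]

-- ===== VERDICT (by name: the statement is the Claim_ definition above) =====
theorem optimize_stepped_data_spec : Claim_equal_optimize_stepped_data := by
  intro data _ _
  unfold Spec_optimize_stepped_data
  by_cases h : data.length ≤ 2
  · rw [optimize_stepped_data, optimize_stepped_data_alt, if_pos h, if_pos h]
  · have hne : data ≠ [] := by
      intro hnil; rw [hnil] at h; simp at h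
    rw [optimize_stepped_data, if_neg h, alt_eq_runs data h]
    have hopt : aMain data 0 [] = runs data := by
      rw [aMain_eq]; simp
    rw [hopt]
    have hemp : (runs data).isEmpty = false := by
      simpa [List.isEmpty_iff] using runs_ne_nil data hne
    have hlast := runs_getLast? data hne
    rw [if_neg]
    simp [hemp, hlast]

theorem optimize_stepped_data_raises : Claim_raises_optimize_stepped_data := by
  unfold Claim_raises_optimize_stepped_data
  constructor
  · intro data _ hr hpre
    rcases hpre with h | ⟨_, hx⟩
    · have := hr.1; omega
    · rw [hr.2.2] at hx; cases hx
  · refine ⟨by decide, ⟨by decide, by decide, by decide⟩, by decide⟩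

-- self-check: the raise witness indeed lies inside Raises_ (read off the theorem above)
theorem pvRaiseWitness_ok :
    Raises_optimize_stepped_data pvRaiseWitness_optimize_stepped_data := by
  have h := optimize_stepped_data_raises
  unfold Claim_raises_optimize_stepped_data at h
  exact h.2.2.1
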